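-- pv_equiv track=rewrite | github.com/kswang2400/lunchnaste | src/app.py | parse_city_text
-- ===== SOURCE A (Python) =====
-- DEFAULT_CITY = 'SF'
--
-- def parse_city_text(string):
--     VALID_CITY_STRINGS = {
--         'SF': ['sf', 'san-francisco'],
--         'CHI': ['chi', 'chicago'],
--         'NYC': ['nyc', 'new-york'],
--         'SEA': ['sea', 'seattle'],
--     }
--
--     for city, valid_strings in VALID_CITY_STRINGS.items():
--         if string.lower() in valid_strings:
--             return city
--
--     return DEFAULT_CITY
-- ===== SOURCE B (Python) =====
-- DEFAULT_CITY = 'SF'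
--
-- _CITY_BY_ALIAS = {
--     'sf': 'SF', 'san-francisco': 'SF',
--     'chi': 'CHI', 'chicago': 'CHI',
--     'nyc': 'NYC', 'new-york': 'NYC',
--     'sea': 'SEA', 'seattle': 'SEA',
-- }
--
-- def parse_city_text(string):
--     return _CITY_BY_ALIAS.get(string.lower(), DEFAULT_CITY)
-- ===== Notes on version B (the rewrite author's own statement) =====
-- stated objective: idiomatic
-- what changed: Replaces the per-city loop with a membership scan of each alias list by a single lookup of string.lower() in a pre-built module-level alias-to-city dict with DEFAULT_CITY as default.
import Mathlib
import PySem

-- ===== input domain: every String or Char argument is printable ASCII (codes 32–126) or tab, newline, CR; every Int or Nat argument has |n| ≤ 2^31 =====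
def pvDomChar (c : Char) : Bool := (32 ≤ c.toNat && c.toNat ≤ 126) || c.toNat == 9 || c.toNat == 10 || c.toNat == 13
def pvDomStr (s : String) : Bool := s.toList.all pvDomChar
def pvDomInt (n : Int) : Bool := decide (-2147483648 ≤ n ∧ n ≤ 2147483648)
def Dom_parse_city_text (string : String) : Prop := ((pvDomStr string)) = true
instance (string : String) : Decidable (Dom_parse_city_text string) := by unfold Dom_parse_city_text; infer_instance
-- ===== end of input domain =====

-- B replaces the per-city loop over alias lists by a single lookup in a pre-built alias-to-city dict (more idiomatic).


-- ===== PORT A =====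
-- the dict items of VALID_CITY_STRINGS, in insertion order
def pvCityItems : List (String × List String) :=
  [("SF", ["sf", "san-francisco"]),
   ("CHI", ["chi", "chicago"]),
   ("NYC", ["nyc", "new-york"]),
   ("SEA", ["sea", "seattle"])]

-- the for-loop with early return: first city whose alias list contains string.lower()
def pvCityLoop (items : List (String × List String)) (string : String) : String :=
  match items with
  | [] => "SF"  -- DEFAULT_CITY
  | (city, valid_strings) :: rest =>
    if PySem.Str.lower string ∈ valid_strings then city else pvCityLoop rest string

def parse_city_text (string : String) : String :=
  pvCityLoop pvCityItems string

-- ===== PORT B =====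
def pvCityByAlias : PySem.Dict String String :=
  PySem.Dict.ofList
    [("sf", "SF"), ("san-francisco", "SF"),
     ("chi", "CHI"), ("chicago", "CHI"),
     ("nyc", "NYC"), ("new-york", "NYC"),
     ("sea", "SEA"), ("seattle", "SEA")]

def parse_city_text_alt (string : String) : String :=
  PySem.Dict.getD pvCityByAlias (PySem.Str.lower string) "SF"

-- ===== PRECONDITION & SPEC =====
def Spec_parse_city_text (string : String) (out : String) : Prop := out = parse_city_text_alt string
instance (string : String) (out : String) : Decidable (Spec_parse_city_text string out) := by unfold Spec_parse_city_text; infer_instance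

-- ===== CLAIM (what is proved, stated in full; the proofs are below) =====
def Claim_equal_parse_city_text : Prop := ∀ (string : String), Dom_parse_city_text string → Spec_parse_city_text string (parse_city_text string)

-- ===== LEMMAS AND PROOFS =====
-- the loop over pvCityItems agrees with a lookup keyed by string.lower()
set_option maxHeartbeats 1000000 in
theorem pvCityLoop_eq_lookup (s : String) :
    pvCityLoop pvCityItems s = PySem.Dict.getD pvCityByAlias (PySem.Str.lower s) "SF" := by
  have h1 : pvCityLoop pvCityItems s =
      (if PySem.Str.lower s ∈ ["sf", "san-francisco"] then "SF"
       else if PySem.Str.lower s ∈ ["chi", "chicago"] then "CHI"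
       else if PySem.Str.lower s ∈ ["nyc", "new-york"] then "NYC"
       else if PySem.Str.lower s ∈ ["sea", "seattle"] then "SEA"
       else "SF") := rfl
  have hd : pvCityByAlias = PySem.Dict.mk
      [("sf", "SF"), ("san-francisco", "SF"),
       ("chi", "CHI"), ("chicago", "CHI"),
       ("nyc", "NYC"), ("new-york", "NYC"),
       ("sea", "SEA"), ("seattle", "SEA")] := rfl
  rw [h1, hd]
  generalize PySem.Str.lower s = l
  simp only [PySem.Dict.getD_eq_get?_getD, PySem.Dict.get?_mk_cons,
    List.mem_cons, List.not_mem_nil, or_false, beq_iff_eq]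
  split_ifs <;> simp_all [PySem.Dict.get?, eq_comm]

-- ===== VERDICT (by name: the statement is the Claim_ definition above) =====
theorem parse_city_text_spec : Claim_equal_parse_city_text := by
  intro s _
  unfold Spec_parse_city_text parse_city_text parse_city_text_alt
  exact pvCityLoop_eq_lookup s
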